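-- pv_equiv track=rewrite | github.com/Chorolee/-agent-session-harness | tools/harness/session_identity.py | _strip_shell_prefix_tokens
-- ===== SOURCE A (Python) =====
-- def _strip_shell_prefix_tokens(command: list[str]) -> list[str]:
--     candidate = _strip_leading_env_assignments(command)
--     while candidate:
--         token = candidate[0]
--         if token not in {"then", "do", "elif", "exec", "command", "builtin", "(", "!"}:
--             break
--         candidate = _strip_leading_env_assignments(candidate[1:])
--     return candidate
--
-- def _strip_leading_env_assignments(command: list[str]) -> list[str]:
--     index = 0
--     while index < len(command):
--         token = command[index]
--         if "=" not in token or token.startswith("-"):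
--             break
--         index += 1
--     return command[index:] if index < len(command) else command
-- ===== SOURCE B (Python) =====
-- _PREFIX_TOKENS = ("then", "do", "elif", "exec", "command", "builtin", "(", "!")
--
-- def _strip_shell_prefix_tokens(command: list[str]) -> list[str]:
--     n = len(command)
--     i = 0
--     while i < n:
--         start = i
--         while i < n and "=" in command[i] and not command[i].startswith("-"):
--             i += 1
--         if i >= n:
--             # run of env assignments reaches the end: kept as-is
--             return command[start:]
--         if command[i] in _PREFIX_TOKENS:
--             i += 1
--         else:
--             break
--     return command[i:]
-- ===== Notes on version B (the rewrite author's own statement) =====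
-- stated objective: alternative
-- what changed: B replaces A's repeated list slicing and helper re-calls (each keyword drop builds a new sliced list and rescans it) with a single forward scan over the original list using one index pointer, slicing only once at the end.
import Mathlib
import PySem

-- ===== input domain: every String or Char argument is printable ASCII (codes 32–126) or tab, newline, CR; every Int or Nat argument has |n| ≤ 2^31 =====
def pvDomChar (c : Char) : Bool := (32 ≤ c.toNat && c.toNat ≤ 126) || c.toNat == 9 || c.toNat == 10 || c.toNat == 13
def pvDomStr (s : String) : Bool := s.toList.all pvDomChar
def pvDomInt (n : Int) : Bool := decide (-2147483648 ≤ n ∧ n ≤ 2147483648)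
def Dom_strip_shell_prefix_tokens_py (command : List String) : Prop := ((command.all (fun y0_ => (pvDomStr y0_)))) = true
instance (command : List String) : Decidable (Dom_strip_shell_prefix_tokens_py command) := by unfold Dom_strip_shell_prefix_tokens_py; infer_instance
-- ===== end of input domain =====

-- B replaces A's repeated list slicing and helper re-calls with a single forward index scan over the original list (objective: alternative).
-- Loops are ported as fuel-based structural recursions; the fuel only makes the same computation total.

def pvKeywords : List String := ["then", "do", "elif", "exec", "command", "builtin", "(", "!"]

-- ===== PORT A =====
-- _strip_leading_env_assignments's index loop (break when "=" not in token or token.startswith("-"))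
def pvEnvIdxAGo (command : List String) : Nat → Nat → Nat
  | index, 0 => index
  | index, fuel + 1 =>
    if h : index < command.length then
      if !(PySem.Str.isIn "=" command[index]) || PySem.Str.startswith command[index] "-" then index
      else pvEnvIdxAGo command (index + 1) fuel
    else index

def pvEnvIdxA (command : List String) (index : Nat) : Nat :=
  pvEnvIdxAGo command index (command.length - index)

-- _strip_leading_env_assignments: command[index:] if index < len(command) else command
-- (index : Nat is nonnegative, so command[index:] is exactly List.drop index)
def pvStripEnvA (command : List String) : List String :=
  if pvEnvIdxA command 0 < command.length then command.drop (pvEnvIdxA command 0) else command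

-- the outer while of _strip_shell_prefix_tokens
def pvStripLoopAGo : List String → Nat → List String
  | [], _ => []
  | token :: rest, 0 => token :: rest
  | token :: rest, fuel + 1 =>
    if pvKeywords.contains token then pvStripLoopAGo (pvStripEnvA rest) fuel
    else token :: rest

def pvStripLoopA (candidate : List String) : List String :=
  pvStripLoopAGo candidate candidate.length

def strip_shell_prefix_tokens_py (command : List String) : List String :=
  pvStripLoopA (pvStripEnvA command)

-- ===== PORT B =====
-- Source B's inner while: advance i past the run of env assignments
def pvRunEndGo (command : List String) : Nat → Nat → Nat
  | i, 0 => i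
  | i, fuel + 1 =>
    if h : i < command.length then
      if PySem.Str.isIn "=" command[i] && !(PySem.Str.startswith command[i] "-") then
        pvRunEndGo command (i + 1) fuel
      else i
    else i

def pvRunEnd (command : List String) (i : Nat) : Nat :=
  pvRunEndGo command i (command.length - i)

-- Source B's outer while loop over the index i (command[i:] = List.drop i since i : Nat)
def pvAltLoopGo (command : List String) : Nat → Nat → List String
  | i, 0 => command.drop i
  | i, fuel + 1 =>
    if _h : i < command.length then
      if hj : pvRunEnd command i < command.length then
        if pvKeywords.contains (command[pvRunEnd command i]'hj) then
          pvAltLoopGo command (pvRunEnd command i + 1) fuel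
        else command.drop (pvRunEnd command i)
      else command.drop i       -- run of env assignments reaches the end: kept as-is
    else command.drop i

def strip_shell_prefix_tokens_py_alt (command : List String) : List String :=
  pvAltLoopGo command 0 command.length

-- ===== PRECONDITION & SPEC =====
def Spec_strip_shell_prefix_tokens_py (command : List String) (out : List String) : Prop := out = strip_shell_prefix_tokens_py_alt command
instance (command : List String) (out : List String) : Decidable (Spec_strip_shell_prefix_tokens_py command out) := by unfold Spec_strip_shell_prefix_tokens_py; infer_instance

-- ===== CLAIM (what is proved, stated in full; the proofs are below) =====
def Claim_equal_strip_shell_prefix_tokens_py : Prop := ∀ (command : List String), Dom_strip_shell_prefix_tokens_py command → Spec_strip_shell_prefix_tokens_py command (strip_shell_prefix_tokens_py command)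

-- ===== LEMMAS AND PROOFS =====

-- the "env assignment" predicate both scans advance over
def pvP (t : String) : Bool := PySem.Str.isIn "=" t && !(PySem.Str.startswith t "-")

-- length of the leading run of env assignments
def pvCnt (l : List String) : Nat := (l.takeWhile pvP).length

theorem pvCnt_nil : pvCnt ([] : List String) = 0 := rfl

theorem pvCnt_cons_pos (x : String) (xs : List String) (hp : pvP x = true) :
    pvCnt (x :: xs) = pvCnt xs + 1 := by
  simp [pvCnt, hp]

theorem pvCnt_cons_neg (x : String) (xs : List String) (hp : pvP x = false) :
    pvCnt (x :: xs) = 0 := by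
  simp [pvCnt, hp]

theorem pvCnt_le (l : List String) : pvCnt l ≤ l.length :=
  List.Sublist.length_le (List.takeWhile_sublist _)

theorem pvBreak_eq (t : String) :
    (!(PySem.Str.isIn "=" t) || PySem.Str.startswith t "-") = !(pvP t) := by
  simp [pvP]

theorem pvEnvIdxAGo_eq (command : List String) (fuel : Nat) :
    ∀ index, command.length - index ≤ fuel →
      pvEnvIdxAGo command index fuel = index + pvCnt (command.drop index) := by
  induction fuel with
  | zero =>
    intro index hf
    rw [pvEnvIdxAGo, List.drop_eq_nil_of_le (by omega), pvCnt_nil]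
    omega
  | succ fuel ih =>
    intro index hf
    rw [pvEnvIdxAGo]
    split
    · rename_i h
      rw [pvBreak_eq]
      cases hp : pvP command[index] with
      | true =>
        simp only [Bool.not_true, Bool.false_eq_true, if_false]
        rw [ih (index + 1) (by omega), List.drop_eq_getElem_cons h, pvCnt_cons_pos _ _ hp]
        omega
      | false =>
        simp only [Bool.not_false, if_true]
        rw [List.drop_eq_getElem_cons h, pvCnt_cons_neg _ _ hp]
        omega
    · rename_i h
      rw [List.drop_eq_nil_of_le (by omega), pvCnt_nil]
      omega

theorem pvEnvIdxA_eq (command : List String) (index : Nat) :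
    pvEnvIdxA command index = index + pvCnt (command.drop index) :=
  pvEnvIdxAGo_eq command _ index (le_refl _)

theorem pvRunEndGo_eq (command : List String) (fuel : Nat) :
    ∀ i, command.length - i ≤ fuel →
      pvRunEndGo command i fuel = i + pvCnt (command.drop i) := by
  induction fuel with
  | zero =>
    intro i hf
    rw [pvRunEndGo, List.drop_eq_nil_of_le (by omega), pvCnt_nil]
    omega
  | succ fuel ih =>
    intro i hf
    rw [pvRunEndGo]
    split
    · rename_i h
      cases hp : pvP command[i] with
      | true =>
        have hp' : (PySem.Str.isIn "=" command[i] && !(PySem.Str.startswith command[i] "-")) = true := hp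
        rw [hp']
        simp only [if_true]
        rw [ih (i + 1) (by omega), List.drop_eq_getElem_cons h, pvCnt_cons_pos _ _ hp]
        omega
      | false =>
        have hp' : (PySem.Str.isIn "=" command[i] && !(PySem.Str.startswith command[i] "-")) = false := hp
        rw [hp']
        simp only [Bool.false_eq_true, if_false]
        rw [List.drop_eq_getElem_cons h, pvCnt_cons_neg _ _ hp]
        omega
    · rename_i h
      rw [List.drop_eq_nil_of_le (by omega), pvCnt_nil]
      omega

theorem pvRunEnd_eq (command : List String) (i : Nat) :
    pvRunEnd command i = i + pvCnt (command.drop i) :=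
  pvRunEndGo_eq command _ i (le_refl _)

theorem pvStripEnvA_eq (l : List String) :
    pvStripEnvA l = if pvCnt l < l.length then l.drop (pvCnt l) else l := by
  unfold pvStripEnvA
  rw [pvEnvIdxA_eq]
  simp

theorem pvStripEnvA_length_le (l : List String) : (pvStripEnvA l).length ≤ l.length := by
  rw [pvStripEnvA_eq]
  split <;> simp

theorem pvStripLoopAGo_fuel (f₁ : Nat) :
    ∀ (f₂ : Nat) (c : List String), c.length ≤ f₁ → c.length ≤ f₂ →
      pvStripLoopAGo c f₁ = pvStripLoopAGo c f₂ := by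
  induction f₁ with
  | zero =>
    intro f₂ c h1 _
    have : c = [] := List.eq_nil_of_length_eq_zero (by omega)
    subst this
    cases f₂ <;> rfl
  | succ f₁ ih =>
    intro f₂ c h1 h2
    cases c with
    | nil => cases f₂ <;> rfl
    | cons token rest =>
      cases f₂ with
      | zero => simp at h2
      | succ f₂ =>
        rw [pvStripLoopAGo, pvStripLoopAGo]
        split
        · have hle := pvStripEnvA_length_le rest
          simp only [List.length_cons] at h1 h2
          exact ih f₂ (pvStripEnvA rest) (by omega) (by omega)
        · rfl

theorem pvStripLoopA_nil : pvStripLoopA [] = [] := rfl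

theorem pvStripLoopA_cons (t : String) (r : List String) :
    pvStripLoopA (t :: r) = if pvKeywords.contains t then pvStripLoopA (pvStripEnvA r) else t :: r := by
  unfold pvStripLoopA
  rw [show (t :: r).length = r.length + 1 from rfl, pvStripLoopAGo]
  split
  · exact pvStripLoopAGo_fuel r.length _ _ (pvStripEnvA_length_le r) (le_refl _)
  · rfl

-- no keyword contains '='
theorem pvKeyword_no_eq (t : String) (h : pvKeywords.contains t = true) :
    PySem.Str.isIn "=" t = false := by
  simp [pvKeywords, List.contains_eq_mem] at h
  rcases h with h | h | h | h | h | h | h | h <;> subst h <;> decide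

theorem pvMain (command : List String) (fuel : Nat) :
    ∀ i, command.length - i ≤ fuel →
      pvStripLoopA (pvStripEnvA (command.drop i)) = pvAltLoopGo command i fuel := by
  induction fuel with
  | zero =>
    intro i hf
    rw [pvAltLoopGo, List.drop_eq_nil_of_le (by omega)]
    rw [show pvStripEnvA [] = [] from rfl, pvStripLoopA_nil]
  | succ fuel ih =>
    intro i hf
    rw [pvAltLoopGo]
    split
    · rename_i h
      have hje : pvRunEnd command i = i + pvCnt (command.drop i) := pvRunEnd_eq command i
      have hkle : pvCnt (command.drop i) ≤ command.length - i := by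
        have := pvCnt_le (command.drop i)
        simpa using this
      by_cases hj : pvRunEnd command i < command.length
      · rw [dif_pos hj]
        have hstrip : pvStripEnvA (command.drop i) = command.drop (pvRunEnd command i) := by
          rw [pvStripEnvA_eq]
          have hcond : pvCnt (command.drop i) < (command.drop i).length := by
            simp only [List.length_drop]
            omega
          rw [if_pos hcond, List.drop_drop, hje, Nat.add_comm]
        have hcons := List.drop_eq_getElem_cons hj
        rw [hstrip, hcons, pvStripLoopA_cons]
        by_cases hkw : pvKeywords.contains (command[pvRunEnd command i]'hj) = true
        · rw [if_pos hkw, if_pos hkw]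
          exact ih (pvRunEnd command i + 1) (by omega)
        · rw [if_neg hkw, if_neg hkw, ← hcons]
      · rw [dif_neg hj]
        have hcons := List.drop_eq_getElem_cons h
        have hp : pvP command[i] = true := by
          by_contra hp0
          have hp0' : pvP command[i] = false := by simpa using hp0
          have hz : pvCnt (command.drop i) = 0 := by
            rw [hcons, pvCnt_cons_neg _ _ hp0']
          omega
        have hstrip : pvStripEnvA (command.drop i) = command.drop i := by
          rw [pvStripEnvA_eq]
          have hcond : ¬ pvCnt (command.drop i) < (command.drop i).length := by
            simp only [List.length_drop]
            omega
          rw [if_neg hcond]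
        have hkw : ¬ pvKeywords.contains command[i] = true := by
          intro hkw
          have hni := pvKeyword_no_eq command[i] hkw
          unfold pvP at hp
          rw [hni] at hp
          simp at hp
        rw [hstrip, hcons, pvStripLoopA_cons, if_neg hkw, ← hcons]
    · rename_i h
      rw [List.drop_eq_nil_of_le (by omega)]
      rw [show pvStripEnvA [] = [] from rfl, pvStripLoopA_nil]

-- ===== VERDICT (by name: the statement is the Claim_ definition above) =====
theorem strip_shell_prefix_tokens_py_spec : Claim_equal_strip_shell_prefix_tokens_py := by
  intro command _
  unfold Spec_strip_shell_prefix_tokens_py strip_shell_prefix_tokens_py strip_shell_prefix_tokens_py_alt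
  rw [show pvStripEnvA command = pvStripEnvA (command.drop 0) from by rw [List.drop_zero]]
  exact pvMain command command.length 0 (by omega)
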